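-- pv_equiv track=rewrite | github.com/dodeca-6-tope/jora | jora/github.py | _analyze_ci
-- ===== SOURCE A (Python) =====
-- from typing import Dict, List
--
-- def _analyze_ci(checks: List[Dict]) -> str:
--     if not checks:
--         return "NONE"
--     if all(c.get("conclusion") == "SUCCESS" for c in checks):
--         return "SUCCESS"
--     if any(c.get("conclusion") == "FAILURE" for c in checks):
--         return "FAILURE"
--     return "PENDING"
-- ===== SOURCE B (Python) =====
-- def _analyze_ci(checks):
--     if not checks:
--         return "NONE"
--     rank = 0
--     for c in checks:
--         conc = c.get("conclusion")
--         rank = max(rank, 2 if conc == "FAILURE" else (0 if conc == "SUCCESS" else 1))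
--     return ("SUCCESS", "PENDING", "FAILURE")[rank]
-- ===== Notes on version B (the rewrite author's own statement) =====
-- stated objective: alternative
-- what changed: Replaces A's staged all/any scans by a single pass that maps each check to a severity rank (SUCCESS=0, PENDING=1, FAILURE=2), keeps a running maximum, and returns the status at the final maximum severity.
import Mathlib
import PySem

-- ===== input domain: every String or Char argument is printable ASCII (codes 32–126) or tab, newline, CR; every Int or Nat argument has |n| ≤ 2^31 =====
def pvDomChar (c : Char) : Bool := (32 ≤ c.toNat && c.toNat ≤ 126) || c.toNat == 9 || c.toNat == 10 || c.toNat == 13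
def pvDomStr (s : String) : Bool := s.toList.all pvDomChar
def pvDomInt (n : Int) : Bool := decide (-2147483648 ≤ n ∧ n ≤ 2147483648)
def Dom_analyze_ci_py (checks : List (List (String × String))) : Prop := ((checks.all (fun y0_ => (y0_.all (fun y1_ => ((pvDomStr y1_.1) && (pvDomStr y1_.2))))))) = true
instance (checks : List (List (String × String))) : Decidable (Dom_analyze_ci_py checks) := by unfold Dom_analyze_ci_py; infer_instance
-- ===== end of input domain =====

-- B replaces A's staged all/any scans by one pass keeping a running maximum
-- severity rank (SUCCESS=0, PENDING=1, FAILURE=2) and indexing the status by it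
-- (objective: alternative single-pass algorithm, same cost).

-- ===== PORT A =====
-- c.get("conclusion") — None (here: none) when the key is absent
def pvConcl (c : List (String × String)) : Option String :=
  (PySem.Dict.mk c).get? "conclusion"

def analyze_ci_py (checks : List (List (String × String))) : String :=
  if checks = [] then "NONE"
  else if checks.all (fun c => pvConcl c == some "SUCCESS") then "SUCCESS"
  else if checks.any (fun c => pvConcl c == some "FAILURE") then "FAILURE"
  else "PENDING"

-- ===== PORT B =====
-- 2 if conc == "FAILURE" else (0 if conc == "SUCCESS" else 1)
def pvRank (o : Option String) : Nat :=
  if o == some "FAILURE" then 2 else if o == some "SUCCESS" then 0 else 1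

def analyze_ci_py_alt (checks : List (List (String × String))) : String :=
  if checks = [] then "NONE"
  else
    let rank := checks.foldl (fun r c => max r (pvRank (pvConcl c))) 0
    -- ("SUCCESS", "PENDING", "FAILURE")[rank]  (rank ∈ {0,1,2} by construction)
    match rank with
    | 0 => "SUCCESS"
    | 1 => "PENDING"
    | _ => "FAILURE"

-- ===== PRECONDITION & SPEC =====
def Spec_analyze_ci_py (checks : List (List (String × String))) (out : String) : Prop := out = analyze_ci_py_alt checks
instance (checks : List (List (String × String))) (out : String) : Decidable (Spec_analyze_ci_py checks out) := by unfold Spec_analyze_ci_py; infer_instance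

-- ===== CLAIM (what is proved, stated in full; the proofs are below) =====
def Claim_equal_analyze_ci_py : Prop := ∀ (checks : List (List (String × String))), Dom_analyze_ci_py checks → Spec_analyze_ci_py checks (analyze_ci_py checks)

-- ===== LEMMAS AND PROOFS =====

def pvFold (checks : List (List (String × String))) : Nat :=
  checks.foldl (fun r c => max r (pvRank (pvConcl c))) 0

theorem pvFold_acc (checks : List (List (String × String))) (a : Nat) :
    checks.foldl (fun r c => max r (pvRank (pvConcl c))) a = max a (pvFold checks) := by
  induction checks generalizing a with
  | nil => simp [pvFold, List.foldl]
  | cons c l ih =>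
    rw [List.foldl_cons, ih]
    have h2 : pvFold (c :: l) = max (max 0 (pvRank (pvConcl c))) (pvFold l) := by
      rw [pvFold, List.foldl_cons, ih]
    rw [h2]; omega

theorem pvFold_cons (c : List (String × String)) (l : List (List (String × String))) :
    pvFold (c :: l) = max (pvRank (pvConcl c)) (pvFold l) := by
  rw [pvFold, List.foldl_cons, pvFold_acc]
  omega

theorem pvRank_eq_zero (o : Option String) : pvRank o = 0 ↔ o = some "SUCCESS" := by
  unfold pvRank
  split
  · next h => simp; intro h'; subst h'; simp at h
  · split
    · next h => simpa using h
    · next h => simp; intro h'; subst h'; simp at h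

theorem pvRank_eq_two (o : Option String) : pvRank o = 2 ↔ o = some "FAILURE" := by
  unfold pvRank
  split
  · next h => simpa using h
  · next h =>
    constructor
    · intro h2; split at h2 <;> omega
    · intro h'; subst h'; simp at h

theorem pvFold_le_two (checks : List (List (String × String))) : pvFold checks ≤ 2 := by
  induction checks with
  | nil => simp [pvFold]
  | cons c l ih =>
    rw [pvFold_cons]
    have : pvRank (pvConcl c) ≤ 2 := by unfold pvRank; split <;> [omega; split <;> omega]
    omega

theorem pvFold_eq_zero (checks : List (List (String × String))) :
    pvFold checks = 0 ↔ ∀ c ∈ checks, pvConcl c = some "SUCCESS" := by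
  induction checks with
  | nil => simp [pvFold]
  | cons c l ih =>
    rw [pvFold_cons]
    simp only [Nat.max_eq_zero_iff, ih, pvRank_eq_zero, List.mem_cons]
    constructor
    · rintro ⟨h0, hl⟩ x hx
      rcases hx with rfl | hx
      · exact h0
      · exact hl x hx
    · intro h
      exact ⟨h c (Or.inl rfl), fun x hx => h x (Or.inr hx)⟩

theorem pvFold_eq_two (checks : List (List (String × String))) :
    pvFold checks = 2 ↔ ∃ c ∈ checks, pvConcl c = some "FAILURE" := by
  induction checks with
  | nil => simp [pvFold]
  | cons c l ih =>
    rw [pvFold_cons]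
    have hc : pvRank (pvConcl c) ≤ 2 := by unfold pvRank; split <;> [omega; split <;> omega]
    have hl := pvFold_le_two l
    constructor
    · intro h
      by_cases hg : pvRank (pvConcl c) = 2
      · exact ⟨c, List.mem_cons_self .., (pvRank_eq_two _).1 hg⟩
      · obtain ⟨x, hx, hx2⟩ := ih.1 (by omega)
        exact ⟨x, List.mem_cons_of_mem _ hx, hx2⟩
    · rintro ⟨x, hx, hx2⟩
      rcases List.mem_cons.1 hx with rfl | hx
      · have := (pvRank_eq_two (pvConcl x)).2 hx2; omega
      · have := ih.2 ⟨x, hx, hx2⟩; omega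

-- ===== VERDICT (by name: the statement is the Claim_ definition above) =====
theorem analyze_ci_py_spec : Claim_equal_analyze_ci_py := by
  intro checks _
  unfold Spec_analyze_ci_py analyze_ci_py analyze_ci_py_alt
  by_cases hnil : checks = []
  · simp [hnil]
  · simp only [hnil, if_false]
    show _ = (match pvFold checks with
      | 0 => "SUCCESS" | 1 => "PENDING" | _ => "FAILURE")
    have hle := pvFold_le_two checks
    have h0 := pvFold_eq_zero checks
    have h2 := pvFold_eq_two checks
    interval_cases h : pvFold checks
    · -- rank 0: all SUCCESS
      have hall : checks.all (fun c => pvConcl c == some "SUCCESS") = true := by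
        simp only [List.all_eq_true, beq_iff_eq]; exact h0.1 rfl
      simp [hall]
    · -- rank 1: not all SUCCESS, no FAILURE
      have hnall : ¬ checks.all (fun c => pvConcl c == some "SUCCESS") = true := by
        simp only [List.all_eq_true, beq_iff_eq]
        intro hA; have := h0.2 hA; omega
      have hnany : ¬ checks.any (fun c => pvConcl c == some "FAILURE") = true := by
        simp only [List.any_eq_true, beq_iff_eq]
        rintro ⟨x, hx, hx2⟩; have := h2.2 ⟨x, hx, hx2⟩; omega
      simp [hnall, hnany]
    · -- rank 2: some FAILURE, not all SUCCESS
      obtain ⟨x, hx, hxF⟩ := h2.1 rfl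
      have hnall : ¬ checks.all (fun c => pvConcl c == some "SUCCESS") = true := by
        simp only [List.all_eq_true, beq_iff_eq]
        intro hA; have := hA x hx; rw [hxF] at this; simp at this
      have hany : checks.any (fun c => pvConcl c == some "FAILURE") = true := by
        simp only [List.any_eq_true, beq_iff_eq]; exact ⟨x, hx, hxF⟩
      simp [hnall, hany]
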